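-- pv_equiv track=rewrite | github.com/jaroslaw-wieczorek/SI-Numbrix-Game-and-SAT-Problem | tseitisin.py | iconverse
-- ===== SOURCE A (Python) =====
-- def iconverse(ints):
--     result = 0
--     power = 1
--     for i in ints:
--         if i > 0:
--             result = result + power
--         power = power * 2
--     return result + 1
-- ===== SOURCE B (Python) =====
-- def iconverse(ints):
--     result = 0
--     for i in reversed(ints):
--         result = result * 2 + (1 if i > 0 else 0)
--     return result + 1
-- ===== Notes on version B (the rewrite author's own statement) =====
-- stated objective: simpler
-- what changed: Horner's method over the reversed bit list with a single running accumulator (result*2 + bit), eliminating A's separate power-of-two variable.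
import Mathlib
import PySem

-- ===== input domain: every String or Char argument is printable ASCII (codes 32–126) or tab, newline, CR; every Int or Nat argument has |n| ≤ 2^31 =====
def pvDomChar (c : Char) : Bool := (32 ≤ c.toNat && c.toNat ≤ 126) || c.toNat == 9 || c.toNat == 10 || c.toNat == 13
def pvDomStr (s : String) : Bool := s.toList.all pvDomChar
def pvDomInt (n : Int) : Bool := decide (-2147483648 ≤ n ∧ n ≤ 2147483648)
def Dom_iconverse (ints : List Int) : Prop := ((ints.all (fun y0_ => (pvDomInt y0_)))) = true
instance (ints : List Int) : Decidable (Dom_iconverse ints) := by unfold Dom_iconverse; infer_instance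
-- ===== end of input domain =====

-- B replaces A's doubling power accumulator by Horner's method over the reversed list (objective: simpler).

-- ===== PORT A =====
def iconverse (ints : List Int) : Int :=
  let st := ints.foldl (fun (st : Int × Int) i =>
    (if i > 0 then st.1 + st.2 else st.1, st.2 * 2)) (0, 1)
  st.1 + 1

-- ===== PORT B =====
def iconverse_alt (ints : List Int) : Int :=
  (ints.reverse.foldl (fun result i => result * 2 + (if i > 0 then 1 else 0)) 0) + 1

-- ===== PRECONDITION & SPEC =====
def Spec_iconverse (ints : List Int) (out : Int) : Prop := out = iconverse_alt ints
instance (ints : List Int) (out : Int) : Decidable (Spec_iconverse ints out) := by unfold Spec_iconverse; infer_instance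

-- ===== CLAIM (what is proved, stated in full; the proofs are below) =====
def Claim_equal_iconverse : Prop := ∀ (ints : List Int), Dom_iconverse ints → Spec_iconverse ints (iconverse ints)

-- ===== LEMMAS AND PROOFS =====
def pvHorner (l : List Int) : Int :=
  l.reverse.foldl (fun result i => result * 2 + (if i > 0 then 1 else 0)) 0

theorem pvHorner_cons (i : Int) (l : List Int) :
    pvHorner (i :: l) = 2 * pvHorner l + (if i > 0 then 1 else 0) := by
  simp [pvHorner, List.foldl_append]
  ring

theorem pvFold_eq (l : List Int) : ∀ r p : Int,
    (l.foldl (fun (st : Int × Int) i =>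
      (if i > 0 then st.1 + st.2 else st.1, st.2 * 2)) (r, p)).1 = r + p * pvHorner l := by
  induction l with
  | nil => intro r p; simp [pvHorner]
  | cons i l ih =>
    intro r p
    simp only [List.foldl_cons, ih, pvHorner_cons]
    split_ifs <;> ring

-- ===== VERDICT (by name: the statement is the Claim_ definition above) =====
theorem iconverse_spec : Claim_equal_iconverse := by
  intro ints _
  unfold Spec_iconverse iconverse iconverse_alt
  have := pvFold_eq ints 0 1
  simp only [this, pvHorner]
  ring
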